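-- pv_equiv track=rewrite | github.com/TrellixVulnTeam/QCC3040_Earbud_3ZLT | QCC514x_304x_Earbud/tools/python_workspace/workspace_env37/csr/wheels/bitsandbobs.py | flatten_le
-- ===== SOURCE A (Python) =====
-- def flatten_le(value, num_words, word_width=16, wrapping=False):
--     r"""
--     Operates on the value, which is something convertible to an integer.
--     Splits it into a number of words of the specified word_width.
--     When wrapping is True, the input value is first masked to the number of
--     bits required for the num_words of word_width.
--
--     The Little End of the value comes at the beginning of the returned list of
--     words. E.g.
--     >>> [hex(x) for x in flatten_le(0x12345678, 4, word_width=8)]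
--     ['0x78', '0x56', '0x34', '0x12']
--
--     >>> [hex(x) for x in flatten_le(0x12345678, 2, word_width=16)]
--     ['0x5678', '0x1234']
--
--     >>> flatten_le(0x12345678, 1)
--     Traceback (most recent call last):
--       File "<stdin>", line 1, in <module>
--       File "........\pylib\csr\wheels\bitsandbobs.py", line 351, in flatten_le
--         >>> hex(build_le([0x010203, 0x040506], word_width = 24))
--     ValueError: 0x12345678 too large to fit in 1 16-bit words!
--
--     >>> [hex(x) for x in flatten_le(0x12345678, 1, word_width=32)]
--     ['0x12345678L']
--
--     >>> [hex(x) for x in flatten_le(0x1234, 1)]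
--     ['0x1234']
--
--     # Demonstrate purpose of wrapping to mask over-sized input value first:
--     >>> [hex(x) for x in flatten_le(0x1FEDCBA98, 2,word_width=16,wrapping=True)]
--     ['0xba98L', '0xfedcL']
--
--     >>> [hex(x) for x in flatten_le(0x1FEDCBA98, 2,word_width=16)]
--     Traceback (most recent call last):
--       File "<stdin>", line 1, in <module>
--       File "........\pylib\csr\wheels\bitsandbobs.py", line 351, in flatten_le
--         >>> hex(build_le([0x0102, 0x0304]))
--     ValueError: 0x1fedcba98 too large to fit in 2 16-bit words!
--     """
--     value = int(value)
--     num_words = int(num_words)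
--     if wrapping:
--         bit_mask = (1 << (num_words * word_width)) - 1
--         value &= bit_mask
--
--     try:
--         words = [0]*num_words
--         index = 0
--         shifted_value = value
--         while shifted_value:
--             words[index] = (shifted_value & ((1 << word_width) -1))
--             index += 1
--             shifted_value >>= word_width
--         return words
--     except IndexError:
--         raise ValueError("0x%x too large to fit in %d %d-bit words!" % (
--             value, num_words, word_width))
-- ===== SOURCE B (Python) =====
-- def flatten_le(value, num_words, word_width=16, wrapping=False):
--     value = int(value)
--     num_words = int(num_words)
--     if wrapping:
--         value &= (1 << (num_words * word_width)) - 1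
--     if num_words < 0 or value >> (num_words * word_width):
--         raise ValueError("0x%x too large to fit in %d %d-bit words!" % (
--             value, num_words, word_width))
--     return _split_le(value, num_words, word_width)
--
--
-- def _split_le(value, n, word_width):
--     # Divide and conquer: the low n//2 words come from the low bits of value,
--     # the remaining words from the high bits.
--     if n == 0:
--         return []
--     if n == 1:
--         return [value]
--     half = n // 2
--     shift = half * word_width
--     hi = value >> shift
--     lo = value - (hi << shift)
--     return _split_le(lo, half, word_width) + _split_le(hi, n - half, word_width)
-- ===== Notes on version B (the rewrite author's own statement) =====
-- stated objective: alternative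
-- what changed: Replaces A's sequential shift-and-mask while-loop over a preallocated [0]*num_words list (overflow via out-of-range write caught as IndexError) with an up-front overflow shift test plus a recursive divide-and-conquer split of the value into the low num_words//2 words and the high remainder.
-- outside the precondition, e.g. on flatten_le(0, 3, -1, False): A returns [0, 0, 0], B raises ValueError; on flatten_le(0, -2, 16, False): A returns [], B raises ValueError; on flatten_le(2, -1, -1, True): A returns [], B raises ValueError
import Mathlib
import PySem

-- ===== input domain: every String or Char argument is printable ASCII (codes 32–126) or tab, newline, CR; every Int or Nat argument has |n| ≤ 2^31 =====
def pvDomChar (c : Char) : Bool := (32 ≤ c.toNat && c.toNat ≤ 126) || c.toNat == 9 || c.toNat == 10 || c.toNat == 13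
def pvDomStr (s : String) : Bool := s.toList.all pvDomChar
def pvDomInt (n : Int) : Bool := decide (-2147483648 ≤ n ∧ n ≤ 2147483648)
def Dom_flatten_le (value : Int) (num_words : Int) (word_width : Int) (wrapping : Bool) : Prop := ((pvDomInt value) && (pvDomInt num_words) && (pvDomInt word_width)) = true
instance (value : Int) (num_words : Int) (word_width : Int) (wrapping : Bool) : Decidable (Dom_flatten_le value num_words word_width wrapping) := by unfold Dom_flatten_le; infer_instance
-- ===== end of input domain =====

-- B replaces A's sequential shift-and-mask while-loop over a preallocated list (overflow via
-- an out-of-range write caught as IndexError) by an up-front overflow shift test plus a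
-- recursive divide-and-conquer split of the value into low/high halves of the word list.

-- ===== PORT A =====
-- A's while loop: writes `shifted & (2^w - 1)` into words[index] while shifted != 0.
-- `x & ((1 << w) - 1)` is ported as `x % 2^w` (Python-exact for every x when w ≥ 0) and
-- `x >> w` as `x // 2^w` (Python-exact for w ≥ 0); Python raises on a negative shift
-- count, i.e. exactly where `.toNat` would clamp — those inputs are outside Pre_.
-- `index` starts at 0 and only increments, so it is a Nat.  Each iteration either stops
-- or increments index, and the out-of-range write (Python: IndexError, re-raised as
-- ValueError, outside Pre_) happens at index = length, so length+1 fuel is exact.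
def flattenLeWords (w : Nat) (fuel : Nat) (words : List Int) (index : Nat) (shifted : Int) : List Int :=
  match fuel with
  | 0 => []               -- never reached with fuel = words.length + 1 - index
  | f + 1 =>
    if shifted = 0 then words
    else if index < words.length then
      flattenLeWords w f (words.set index (PySem.Int.mod shifted (2 ^ w))) (index + 1)
        (PySem.Int.floordiv shifted (2 ^ w))
    else []               -- Python: IndexError → raise ValueError (outside Pre_)

def flatten_le (value : Int) (num_words : Int) (word_width : Int) (wrapping : Bool) : List Int :=
  -- value = int(value); num_words = int(num_words): identity on Int
  let value := if wrapping
    then PySem.Int.mod value (2 ^ (num_words * word_width).toNat)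
      -- value &= (1 << (num_words*word_width)) - 1 ; x & (2^e - 1) == x % 2^e (Python-exact,
      -- any x, e ≥ 0); Python raises on a negative shift count (outside Pre_)
    else value
  let words := List.replicate num_words.toNat 0   -- [0]*num_words ([] when num_words ≤ 0)
  flattenLeWords word_width.toNat (words.length + 1) words 0 value

-- ===== PORT B =====
-- Source B's _split_le: low n//2 words from the low bits, the rest from the high bits.
-- `v >> s` is ported as `v // 2^s` and `hi << s` as `hi * 2^s` (Python-exact, s ≥ 0).
def altSplit (w : Nat) (v : Int) (n : Nat) : List Int :=
  if n = 0 then []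
  else if n = 1 then [v]
  else
    let hi := PySem.Int.floordiv v (2 ^ (n / 2 * w))
    let lo := v - hi * 2 ^ (n / 2 * w)
    altSplit w lo (n / 2) ++ altSplit w hi (n - n / 2)
termination_by n
decreasing_by all_goals omega

def flatten_le_alt (value : Int) (num_words : Int) (word_width : Int) (wrapping : Bool) : List Int :=
  let value := if wrapping
    then PySem.Int.mod value (2 ^ (num_words * word_width).toNat)   -- same mask line as in A/b.py
    else value
  if num_words < 0 then []          -- Source B raises ValueError here (outside Pre_)
  else if PySem.Int.floordiv value (2 ^ (num_words * word_width).toNat) ≠ 0 then []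
      -- `value >> (num_words*word_width)` nonzero: Source B raises ValueError (outside Pre_);
      -- the shift is ported as // 2^count, exact for count ≥ 0 (Python raises on count < 0,
      -- also outside Pre_)
  else altSplit word_width.toNat value num_words.toNat

-- ===== PRECONDITION & SPEC =====
-- Pre_ excludes exactly the inputs where A or B raises ValueError: a negative word_width or
-- negative num_words (A can still RETURN there when the (masked) value is 0 — it never
-- shifts and returns the zero/empty word list, an accident of the preallocation — while B's
-- own validation raises ValueError, so these corners are excluded rather than matched) and,
-- without wrapping, a value that does not fit (negative, or ≥ 2^(num_words*word_width)).
-- The `32 ≤ …` cap only avoids computing astronomical powers: within Dom (value ≤ 2^31 < 2^32)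
-- it is equivalent to value < 2^(num_words*word_width), so nothing extra is excluded.
def Pre_flatten_le (value : Int) (num_words : Int) (word_width : Int) (wrapping : Bool) : Prop :=
  0 ≤ word_width ∧ 0 ≤ num_words ∧
  (if wrapping then True
   else 0 ≤ value ∧
     (32 ≤ num_words.toNat * word_width.toNat ∨ value < 2 ^ (num_words.toNat * word_width.toNat)))

instance (value : Int) (num_words : Int) (word_width : Int) (wrapping : Bool) : Decidable (Pre_flatten_le value num_words word_width wrapping) := by unfold Pre_flatten_le; infer_instance

def pvWitness_flatten_le : Int × Int × Int × Bool := (305419896, 4, 8, false)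

def Spec_flatten_le (value : Int) (num_words : Int) (word_width : Int) (wrapping : Bool) (out : List Int) : Prop := out = flatten_le_alt value num_words word_width wrapping
instance (value : Int) (num_words : Int) (word_width : Int) (wrapping : Bool) (out : List Int) : Decidable (Spec_flatten_le value num_words word_width wrapping out) := by unfold Spec_flatten_le; infer_instance

-- ===== CLAIM (what is proved, stated in full; the proofs are below) =====
def Claim_equal_flatten_le : Prop := ∀ (value : Int) (num_words : Int) (word_width : Int) (wrapping : Bool), Dom_flatten_le value num_words word_width wrapping → Pre_flatten_le value num_words word_width wrapping → Spec_flatten_le value num_words word_width wrapping (flatten_le value num_words word_width wrapping)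

-- ===== LEMMAS AND PROOFS =====

-- Proof-side characterisation: the little-endian digits of v in base 2^w, n of them.
def altLeWords (w : Nat) : Int → Nat → List Int
  | _, 0 => []
  | rem, n + 1 =>
    PySem.Int.mod rem (2 ^ w) :: altLeWords w (PySem.Int.floordiv rem (2 ^ w)) n

lemma altLeWords_zero (w : Nat) : ∀ n, altLeWords w 0 n = List.replicate n 0 := by
  intro n
  induction n with
  | zero => rfl
  | succ n ih =>
      simp [altLeWords, List.replicate_succ, PySem.Int.mod, PySem.Int.floordiv, Int.fmod, ih]

lemma take_set_succ (l : List Int) (i : Nat) (a : Int) (h : i < l.length) :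
    (l.set i a).take (i + 1) = l.take i ++ [a] := by
  rw [List.set_eq_take_append_cons_drop, if_pos h]
  rw [show i + 1 = (l.take i).length + 1 by simp [Nat.min_eq_left (Nat.le_of_lt h)]]
  simp [List.take_append]

lemma flattenLeWords_eq (w : Nat) : ∀ (n : Nat) (words : List Int) (i : Nat) (s : Int),
    0 ≤ s → s < 2 ^ (n * w) → i + n = words.length →
    words.drop i = List.replicate n 0 →
    flattenLeWords w (n + 1) words i s = words.take i ++ altLeWords w s n := by
  intro n
  induction n with
  | zero =>
      intro words i s hs hlt hlen _
      rw [Nat.zero_mul, pow_zero] at hlt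
      have hz : s = 0 := by omega
      have hle : words.length ≤ i := by omega
      subst hz
      simp [flattenLeWords, altLeWords, List.take_of_length_le hle]
  | succ n ih =>
      intro words i s hs hlt hlen hdrop
      by_cases hz : s = 0
      · subst hz
        rw [show flattenLeWords w (n + 1 + 1) words i 0 = words from rfl,
          altLeWords_zero w (n + 1), ← hdrop, List.take_append_drop]
      · have hpos : (0:Int) < 2 ^ w := by positivity
        have hidx : i < words.length := by omega
        set d := PySem.Int.mod s (2 ^ w) with hd
        have hdiv : PySem.Int.floordiv s (2 ^ w) = s / 2 ^ w :=
          PySem.Int.floordiv_eq_ediv_of_pos hpos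
        have hs' : 0 ≤ PySem.Int.floordiv s (2 ^ w) := by
          rw [hdiv]; exact Int.ediv_nonneg hs (le_of_lt hpos)
        have hlt' : PySem.Int.floordiv s (2 ^ w) < 2 ^ (n * w) := by
          rw [hdiv]
          apply Int.ediv_lt_of_lt_mul hpos
          calc s < 2 ^ ((n + 1) * w) := hlt
            _ = 2 ^ (n * w) * 2 ^ w := by rw [← pow_add]; ring_nf
        have hdrop1 : words.drop (i + 1) = List.replicate n 0 := by
          have h1 : words.drop i = 0 :: List.replicate n 0 := by
            simpa [List.replicate_succ] using hdrop
          have h2 := congrArg (List.drop 1) h1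
          simpa [List.drop_drop, Nat.add_comm] using h2
        have hdrop' : (words.set i d).drop (i + 1) = List.replicate n 0 := by
          rw [List.drop_set_of_lt (by omega), hdrop1]
        have hlen' : (i + 1) + n = (words.set i d).length := by
          rw [List.length_set]; omega
        have hrec := ih (words.set i d) (i + 1) (PySem.Int.floordiv s (2 ^ w)) hs' hlt' hlen' hdrop'
        have hstep : flattenLeWords w (n + 1 + 1) words i s =
            flattenLeWords w (n + 1) (words.set i d) (i + 1) (PySem.Int.floordiv s (2 ^ w)) := by
          rw [show flattenLeWords w (n + 1 + 1) words i s =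
            if s = 0 then words else if i < words.length then
              flattenLeWords w (n + 1) (words.set i (PySem.Int.mod s (2 ^ w))) (i + 1)
                (PySem.Int.floordiv s (2 ^ w)) else [] from rfl,
            if_neg hz, if_pos hidx]
        rw [hstep, hrec, take_set_succ words i d hidx,
          show altLeWords w s (n + 1) = d :: altLeWords w (PySem.Int.floordiv s (2 ^ w)) n from rfl,
          List.append_assoc]
        rfl

lemma emod_mul_ediv (v K M : Int) (hK : 0 < K) :
    (v % (K * M)) / K = (v / K) % M := by
  rw [Int.emod_def, Int.emod_def, ← Int.ediv_ediv_of_nonneg (le_of_lt hK)]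
  have h : v - K * M * (v / K / M) = v + (-(M * (v / K / M))) * K := by ring
  rw [h, Int.add_mul_ediv_right _ _ (ne_of_gt hK)]
  ring

lemma altLeWords_append (w : Nat) : ∀ (a : Nat) (b : Nat) (v : Int), 0 ≤ v →
    altLeWords w v (a + b) =
      altLeWords w (v % 2 ^ (a * w)) a ++ altLeWords w (v / 2 ^ (a * w)) b := by
  intro a
  induction a with
  | zero =>
      intro b v _
      simp [altLeWords]
  | succ a ih =>
      intro b v hv
      have hK : (0:Int) < 2 ^ w := by positivity
      have hKM : (0:Int) < 2 ^ ((a + 1) * w) := by positivity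
      have hmul : (2:Int) ^ ((a + 1) * w) = 2 ^ w * 2 ^ (a * w) := by
        rw [← pow_add]; ring_nf
      have hmodpos : 0 ≤ v % 2 ^ ((a + 1) * w) := Int.emod_nonneg v (ne_of_gt hKM)
      have e1 : (v % 2 ^ ((a + 1) * w)) % 2 ^ w = v % 2 ^ w := by
        apply Int.emod_emod_of_dvd
        rw [hmul]; exact Dvd.intro _ rfl
      have e2 : (v % 2 ^ ((a + 1) * w)) / 2 ^ w = (v / 2 ^ w) % 2 ^ (a * w) := by
        rw [hmul]; exact emod_mul_ediv v (2 ^ w) (2 ^ (a * w)) hK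
      have e3 : v / 2 ^ ((a + 1) * w) = (v / 2 ^ w) / 2 ^ (a * w) := by
        rw [hmul, ← Int.ediv_ediv_of_nonneg (le_of_lt hK)]
      have hv' : 0 ≤ v / 2 ^ w := Int.ediv_nonneg hv (le_of_lt hK)
      rw [show a + 1 + b = (a + b) + 1 from by omega]
      show PySem.Int.mod v (2 ^ w) :: altLeWords w (PySem.Int.floordiv v (2 ^ w)) (a + b) =
        (PySem.Int.mod (v % 2 ^ ((a + 1) * w)) (2 ^ w) ::
          altLeWords w (PySem.Int.floordiv (v % 2 ^ ((a + 1) * w)) (2 ^ w)) a) ++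
        altLeWords w (v / 2 ^ ((a + 1) * w)) b
      rw [PySem.Int.mod_eq_emod_of_pos hK, PySem.Int.mod_eq_emod_of_pos hK,
        PySem.Int.floordiv_eq_ediv_of_pos hK, PySem.Int.floordiv_eq_ediv_of_pos hK,
        e1, e2, e3, ih b (v / 2 ^ w) hv']
      simp

lemma altSplit_eq (w : Nat) : ∀ (n : Nat) (v : Int), 0 ≤ v → v < 2 ^ (n * w) →
    altSplit w v n = altLeWords w v n := by
  intro n
  induction n using Nat.strong_induction_on with
  | _ n ih =>
      intro v hv hlt
      match n with
      | 0 => simp [altSplit, altLeWords]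
      | 1 =>
          have hK : (0:Int) < 2 ^ w := by positivity
          have hmv : PySem.Int.mod v (2 ^ w) = v := by
            rw [PySem.Int.mod_eq_emod_of_pos hK]
            exact Int.emod_eq_of_lt hv (by simpa using hlt)
          rw [show altSplit w v 1 = [v] from by simp [altSplit],
            show altLeWords w v 1 = [PySem.Int.mod v (2 ^ w)] from rfl, hmv]
      | (m + 2) =>
          set n := m + 2 with hn
          have hKM : (0:Int) < 2 ^ (n / 2 * w) := by positivity
          have hdivd : PySem.Int.floordiv v (2 ^ (n / 2 * w)) = v / 2 ^ (n / 2 * w) :=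
            PySem.Int.floordiv_eq_ediv_of_pos hKM
          have hstep : altSplit w v n =
              altSplit w (v - PySem.Int.floordiv v (2 ^ (n / 2 * w)) * 2 ^ (n / 2 * w)) (n / 2) ++
              altSplit w (PySem.Int.floordiv v (2 ^ (n / 2 * w))) (n - n / 2) := by
            rw [altSplit]; simp [hn]
          have hmod : v - PySem.Int.floordiv v (2 ^ (n / 2 * w)) * 2 ^ (n / 2 * w)
              = v % 2 ^ (n / 2 * w) := by
            rw [hdivd, Int.emod_def]; ring
          have hlo0 : 0 ≤ v % 2 ^ (n / 2 * w) := Int.emod_nonneg v (ne_of_gt hKM)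
          have hlo1 : v % 2 ^ (n / 2 * w) < 2 ^ (n / 2 * w) := Int.emod_lt_of_pos v hKM
          have hhi0 : 0 ≤ v / 2 ^ (n / 2 * w) := Int.ediv_nonneg hv (le_of_lt hKM)
          have hhi1 : v / 2 ^ (n / 2 * w) < 2 ^ ((n - n / 2) * w) := by
            apply Int.ediv_lt_of_lt_mul hKM
            calc v < 2 ^ (n * w) := hlt
              _ = 2 ^ ((n - n / 2) * w) * 2 ^ (n / 2 * w) := by
                rw [← pow_add]
                congr 1
                have : n - n / 2 + n / 2 = n := by omega
                rw [← Nat.add_mul, this]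
          rw [hstep, hmod, hdivd,
            ih (n / 2) (by omega) _ hlo0 hlo1,
            ih (n - n / 2) (by omega) _ hhi0 hhi1,
            ← altLeWords_append w (n / 2) (n - n / 2) v hv,
            show n / 2 + (n - n / 2) = n by omega]

-- ===== VERDICT (by name: the statement is the Claim_ definition above) =====
theorem flatten_le_spec : Claim_equal_flatten_le := by
  intro value num_words word_width wrapping hdom hpre
  simp only [Spec_flatten_le, flatten_le, flatten_le_alt]
  simp only [Dom_flatten_le, pvDomInt, Bool.and_eq_true, decide_eq_true_eq] at hdom
  obtain ⟨⟨hv, hn⟩, hw⟩ := hdom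
  obtain ⟨hww, hnw, hpre2⟩ := hpre
  set v : Int := if wrapping then PySem.Int.mod value (2 ^ (num_words * word_width).toNat)
    else value with hvdef
  have hE : (num_words * word_width).toNat = num_words.toNat * word_width.toNat :=
    Int.toNat_mul hnw hww
  have hbounds : 0 ≤ v ∧ v < 2 ^ (num_words.toNat * word_width.toNat) := by
    cases wrapping with
    | false =>
        simp only [if_neg Bool.false_ne_true] at hvdef
        simp only [if_neg Bool.false_ne_true] at hpre2
        obtain ⟨hv0, hcap⟩ := hpre2
        refine ⟨by omega, ?_⟩
        rcases hcap with h32 | hlt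
        · calc v = value := hvdef
            _ < 2 ^ 32 := by omega
            _ ≤ 2 ^ (num_words.toNat * word_width.toNat) :=
              pow_le_pow_right₀ (by norm_num) h32
        · omega
    | true =>
        simp only [if_true] at hvdef
        have hpow : (0:Int) < 2 ^ (num_words * word_width).toNat := by positivity
        refine ⟨hvdef ▸ PySem.Int.mod_nonneg value hpow, ?_⟩
        rw [← hE]
        exact hvdef ▸ PySem.Int.mod_lt value hpow
  have hne : ¬ num_words < 0 := by omega
  have hpowE : (0:Int) < 2 ^ (num_words * word_width).toNat := by positivity
  have hdiv0 : PySem.Int.floordiv v (2 ^ (num_words * word_width).toNat) = 0 := by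
    rw [PySem.Int.floordiv_eq_ediv_of_pos hpowE]
    apply Int.ediv_eq_zero_of_lt hbounds.1
    rw [hE]; exact hbounds.2
  rw [if_neg hne, if_neg (by rw [hdiv0]; simp)]
  simp only [List.length_replicate]
  rw [flattenLeWords_eq word_width.toNat num_words.toNat
    (List.replicate num_words.toNat 0) 0 v hbounds.1 hbounds.2
    (by simp) (by simp),
    altSplit_eq word_width.toNat num_words.toNat v hbounds.1 hbounds.2]
  simp
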